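-- pv_equiv track=rewrite | github.com/shehiryar/personal-projects | travelling salesman/TSP_STUDENT_TESTING_TOOL.py | marker_check_gene_pool_validity
-- ===== SOURCE A (Python) =====
-- def marker_check_gene_pool_validity(gene_pool, provided_map):
--     validated_map = True
--     location_errors = 0
--     for x in gene_pool:
--         temp_locations = 0
--         for i in provided_map:
--             temp_locations += x.count(i)
--         if temp_locations != len(provided_map):
--             location_errors += 1
--     if location_errors > 0:
--         validated_map = False
--
--     return validated_map
-- ===== SOURCE B (Python) =====
-- def marker_check_gene_pool_validity(gene_pool, provided_map):
--     table = {}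
--     for i in provided_map:
--         table[i] = table.get(i, 0) + 1
--     n = len(provided_map)
--     return all(sum(table.get(e, 0) for e in gene) == n for gene in gene_pool)
-- ===== Notes on version B (the rewrite author's own statement) =====
-- stated objective: faster
-- what changed: Builds a multiplicity dict of provided_map once and sums prebuilt weights over each gene's own elements (short-circuiting with all), instead of scanning every gene once per map entry with list.count.
import Mathlib
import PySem

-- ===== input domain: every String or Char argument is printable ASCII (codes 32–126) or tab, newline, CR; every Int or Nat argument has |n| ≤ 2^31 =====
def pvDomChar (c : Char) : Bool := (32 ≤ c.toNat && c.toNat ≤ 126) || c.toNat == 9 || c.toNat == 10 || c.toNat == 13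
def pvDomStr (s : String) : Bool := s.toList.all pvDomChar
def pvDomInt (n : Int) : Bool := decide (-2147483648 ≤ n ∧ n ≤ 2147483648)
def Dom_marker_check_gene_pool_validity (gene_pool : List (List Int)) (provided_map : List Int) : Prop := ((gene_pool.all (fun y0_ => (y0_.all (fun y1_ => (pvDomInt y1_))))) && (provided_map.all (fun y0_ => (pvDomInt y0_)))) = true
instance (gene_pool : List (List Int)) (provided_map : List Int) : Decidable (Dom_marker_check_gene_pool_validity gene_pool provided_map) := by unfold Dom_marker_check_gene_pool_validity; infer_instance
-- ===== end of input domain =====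

-- B builds a multiplicity table of provided_map once and sums table weights over each
-- gene's own elements, instead of scanning each gene once per map entry (objective: faster).

-- ===== PORT A =====
def marker_check_gene_pool_validity (gene_pool : List (List Int)) (provided_map : List Int) : Bool :=
  let validated_map := true
  let location_errors : Int := gene_pool.foldl (fun location_errors x =>
    let temp_locations : Int :=
      provided_map.foldl (fun temp_locations i => temp_locations + (PySem.List.count x i : Int)) 0
    if temp_locations ≠ (provided_map.length : Int) then location_errors + 1 else location_errors) 0
  if location_errors > 0 then false else validated_map

-- ===== PORT B =====
def marker_check_gene_pool_validity_alt (gene_pool : List (List Int)) (provided_map : List Int) : Bool :=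
  let table : PySem.Dict Int Int :=
    provided_map.foldl (fun table i => table.insert i (table.getD i 0 + 1)) PySem.Dict.empty
  let n : Int := provided_map.length
  gene_pool.all (fun gene => gene.foldl (fun t e => t + table.getD e 0) 0 == n)

-- ===== PRECONDITION & SPEC =====
def Spec_marker_check_gene_pool_validity (gene_pool : List (List Int)) (provided_map : List Int) (out : Bool) : Prop := out = marker_check_gene_pool_validity_alt gene_pool provided_map
instance (gene_pool : List (List Int)) (provided_map : List Int) (out : Bool) : Decidable (Spec_marker_check_gene_pool_validity gene_pool provided_map out) := by unfold Spec_marker_check_gene_pool_validity; infer_instance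

-- ===== CLAIM (what is proved, stated in full; the proofs are below) =====
def Claim_equal_marker_check_gene_pool_validity : Prop := ∀ (gene_pool : List (List Int)) (provided_map : List Int), Dom_marker_check_gene_pool_validity gene_pool provided_map → Spec_marker_check_gene_pool_validity gene_pool provided_map (marker_check_gene_pool_validity gene_pool provided_map)

-- ===== LEMMAS AND PROOFS =====

-- ===== VERDICT (by name: the statement is the Claim_ definition above) =====
-- double counting: summing x.count over pm = summing pm.count over x
lemma sum_ite_count (e : Int) (pm : List Int) :
    (pm.map (fun i => if e = i then (1:Int) else 0)).sum = (pm.count e : Int) := by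
  induction pm with
  | nil => simp
  | cons i pm' ih =>
    simp only [List.map_cons, List.sum_cons, List.count_cons, ih]
    rcases eq_or_ne e i with h | h
    · simp [h]; ring
    · simp [h, Ne.symm h]

lemma count_sum_cons (e : Int) (x' pm : List Int) :
    (pm.map (fun i => ((e::x').count i : Int))).sum
      = (pm.map (fun i => (x'.count i : Int))).sum + (pm.count e : Int) := by
  induction pm with
  | nil => simp
  | cons i pm' ih =>
    simp only [List.map_cons, List.sum_cons, List.count_cons]
    rcases eq_or_ne i e with h | h
    · simp [h, sum_ite_count]; ring
    · simp [h, Ne.symm h, sum_ite_count]; ring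

lemma exchange_sum (x pm : List Int) :
    (pm.map (fun i => (x.count i : Int))).sum
      = (x.map (fun e => (pm.count e : Int))).sum := by
  induction x with
  | nil => simp
  | cons e x' ih =>
    rw [count_sum_cons, ih]
    simp only [List.map_cons, List.sum_cons]
    ring

lemma temp_eq (x pm : List Int) :
    pm.foldl (fun t i => t + (PySem.List.count x i : Int)) 0
      = x.foldl (fun t e =>
          t + (pm.foldl (fun d j => d.insert j (d.getD j 0 + 1)) PySem.Dict.empty).getD e 0) 0 := by
  rw [PySem.List.foldl_add, PySem.List.foldl_add]
  simp only [PySem.Dict.foldl_insert_getD_add_one_eq_counter, PySem.Dict.getD_counter,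
    PySem.List.count]
  rw [exchange_sum]

theorem marker_check_gene_pool_validity_spec : Claim_equal_marker_check_gene_pool_validity := by
  intro gene_pool provided_map _
  unfold Spec_marker_check_gene_pool_validity
  unfold marker_check_gene_pool_validity marker_check_gene_pool_validity_alt
  simp only [← temp_eq]
  rw [PySem.List.foldl_ite_add_one
    (fun x => provided_map.foldl (fun t i => t + (PySem.List.count x i : Int)) 0
      ≠ (provided_map.length : Int))]
  by_cases hz : List.countP
      (fun x => decide (List.foldl (fun t i => t + (PySem.List.count x i : Int)) 0 provided_map
        ≠ (provided_map.length : Int))) gene_pool = 0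
  · rw [hz]
    norm_num
    intro x hx
    have := (List.countP_eq_zero.mp hz) x hx
    simpa using this
  · have hpos : 0 < List.countP
        (fun x => decide (List.foldl (fun t i => t + (PySem.List.count x i : Int)) 0 provided_map
          ≠ (provided_map.length : Int))) gene_pool := Nat.pos_of_ne_zero hz
    rw [if_pos (by rw [zero_add]; exact_mod_cast hpos)]
    symm
    rw [List.all_eq_false]
    rw [List.countP_pos_iff] at hpos
    obtain ⟨x, hx, hp⟩ := hpos
    exact ⟨x, hx, by simpa using hp⟩
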